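-- pv_equiv track=rewrite | github.com/aimhubio/aim | pkgs/aimstack/base/boards/logs_overview.py | container_info_table
-- ===== SOURCE A (Python) =====
-- from collections import defaultdict
--
-- def container_info_table(cont_infos):
--     table_data = defaultdict(list)
--     for i, cont_info in enumerate(cont_infos):
--         for key, val in cont_info.items():
--             if len(table_data[key]) < i:
--                 table_data[key].extend([None] * (i - len(table_data[key])))
--             table_data[key].append(f'{val}')
--     return table_data
-- ===== SOURCE B (Python) =====
-- from collections import defaultdict
--
-- def container_info_table(cont_infos):
--     # Column-major: one pass groups (row, value) occurrences per key (dict keeps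
--     # first-appearance key order); each column is then allocated at its exact
--     # extent and filled by direct assignment instead of running padding.
--     occ = {}
--     for i, cont_info in enumerate(cont_infos):
--         for key, val in cont_info.items():
--             occ.setdefault(key, []).append((i, f'{val}'))
--     table_data = defaultdict(list)
--     for key, pairs in occ.items():
--         col = [None] * (pairs[-1][0] + 1)
--         for i, v in pairs:
--             col[i] = v
--         table_data[key] = col
--     return table_data
-- ===== Notes on version B (the rewrite author's own statement) =====
-- stated objective: alternative
-- what changed: A builds the table row-by-row, padding each key's growing column with None as it goes; B is column-major: one pass records each key's last-appearance row index (dict insertion order giving first-appearance key order), then each column is built in a single comprehension over range(last+1).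
import Mathlib
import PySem

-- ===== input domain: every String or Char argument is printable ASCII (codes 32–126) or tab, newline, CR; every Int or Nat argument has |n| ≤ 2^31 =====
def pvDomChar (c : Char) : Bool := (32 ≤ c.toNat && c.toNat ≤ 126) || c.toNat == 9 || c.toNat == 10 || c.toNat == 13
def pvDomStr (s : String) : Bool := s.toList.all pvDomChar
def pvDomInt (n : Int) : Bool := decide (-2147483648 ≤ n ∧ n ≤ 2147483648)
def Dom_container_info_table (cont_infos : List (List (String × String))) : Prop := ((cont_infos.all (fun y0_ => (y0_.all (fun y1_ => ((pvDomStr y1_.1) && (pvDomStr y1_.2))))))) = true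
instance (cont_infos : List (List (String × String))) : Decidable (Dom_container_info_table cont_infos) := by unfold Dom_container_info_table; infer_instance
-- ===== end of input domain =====

-- B replaces A's row-by-row running padding with a column-major decomposition: one pass
-- groups (row index, value) occurrences per key, then each column is allocated at its
-- exact extent and filled by direct assignment (objective: alternative decomposition,
-- same asymptotic cost).

-- ===== PORT A =====
-- one iteration of A's inner loop: defaultdict access (setdefault), pad with None, append f'{val}' (val is a str, so f'{val}' = val)
def aStep (i : Int) (d : PySem.Dict String (List (Option String))) (p : String × String) :
    PySem.Dict String (List (Option String)) :=
  let d := d.setdefault p.1 []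
  let cur := d.getD p.1 []
  let d := if (cur.length : Int) < i then
      d.insert p.1 (cur ++ List.replicate (i - (cur.length : Int)).toNat none)
    else d
  d.insert p.1 (d.getD p.1 [] ++ [some p.2])

def container_info_table (cont_infos : List (List (String × String))) :
    List (String × List (Option String)) :=
  ((PySem.List.enumerate cont_infos 0).foldl
    (fun d p => (PySem.Dict.ofList p.2).items.foldl (aStep p.1) d)
    PySem.Dict.empty).items

-- ===== PORT B =====
-- first pass step: occ.setdefault(key, []).append((i, f'{val}'))
def bStep (i : Int) (d : PySem.Dict String (List (Int × String))) (q : String × String) :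
    PySem.Dict String (List (Int × String)) :=
  d.modify q.1 [] (· ++ [(i, q.2)])

-- second pass: col = [None] * (pairs[-1][0] + 1), then col[i] = v for each occurrence
def bCol (pairs : List (Int × String)) : List (Option String) :=
  match PySem.List.pyGet? pairs (-1) with
  | none => []  -- unreachable: every occurrence list built by the first pass is nonempty
  | some lastp =>
      pairs.foldl (fun col q => col.set q.1.toNat (some q.2))
        (List.replicate (lastp.1.toNat + 1) none)

def container_info_table_alt (cont_infos : List (List (String × String))) :
    List (String × List (Option String)) :=
  ((PySem.List.enumerate cont_infos 0).foldl
    (fun d p => (PySem.Dict.ofList p.2).items.foldl (bStep p.1) d)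
    PySem.Dict.empty).items.map (fun p => (p.1, bCol p.2))

-- ===== PRECONDITION & SPEC =====
def Spec_container_info_table (cont_infos : List (List (String × String))) (out : List (String × List (Option String))) : Prop := out = container_info_table_alt cont_infos
instance (cont_infos : List (List (String × String))) (out : List (String × List (Option String))) : Decidable (Spec_container_info_table cont_infos out) := by unfold Spec_container_info_table; infer_instance

-- ===== CLAIM (what is proved, stated in full; the proofs are below) =====
def Claim_equal_container_info_table : Prop := ∀ (cont_infos : List (List (String × String))), Dom_container_info_table cont_infos → Spec_container_info_table cont_infos (container_info_table cont_infos)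

-- ===== LEMMAS AND PROOFS =====

def rowD (ci : List (List (String × String))) (i : Nat) : PySem.Dict String String :=
  PySem.Dict.ofList (ci.getD i [])
def processA (ci : List (List (String × String))) (n : Nat) :
    PySem.Dict String (List (Option String)) :=
  (PySem.List.enumerate (ci.take n) 0).foldl
    (fun d p => (PySem.Dict.ofList p.2).items.foldl (aStep p.1) d)
    PySem.Dict.empty

lemma processA_succ (ci : List (List (String × String))) (n : Nat) (hn : n < ci.length) :
    processA ci (n+1) = (rowD ci n).items.foldl (aStep (n : Int)) (processA ci n) := by
  unfold processA
  rw [List.take_add_one, List.getElem?_eq_getElem hn, Option.toList_some,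
    PySem.List.enumerate_append, List.foldl_append,
    List.length_take_of_le (le_of_lt hn)]
  simp only [PySem.List.enumerate_cons, PySem.List.enumerate_nil, List.foldl_cons,
    List.foldl_nil, zero_add]
  congr 1
  simp [rowD, List.getD_eq_getElem?_getD, List.getElem?_eq_getElem hn]
def colLen (ci : List (List (String × String))) (k : String) : Nat → Nat
  | 0 => 0
  | n + 1 => if (rowD ci n).contains k then n + 1 else colLen ci k n
def colF (ci : List (List (String × String))) (k : String) (n : Nat) : List (Option String) :=
  (List.range n).map (fun i => (rowD ci i).get? k)
def keyO (ci : List (List (String × String))) : Nat → List String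
  | 0 => []
  | n + 1 => PySem.Set.update (keyO ci n) (rowD ci n).keys

lemma length_colF (ci : List (List (String × String))) (k : String) (n : Nat) :
    (colF ci k n).length = n := by simp [colF]
lemma colLen_le (ci : List (List (String × String))) (k : String) (n : Nat) :
    colLen ci k n ≤ n := by
  induction n with
  | zero => simp [colLen]
  | succ n ih => simp only [colLen]; split <;> omega

lemma colF_pad (ci : List (List (String × String))) (k : String) (n : Nat) :
    colF ci k n = colF ci k (colLen ci k n)
      ++ List.replicate (n - colLen ci k n) none := by
  induction n with
  | zero => simp [colLen]
  | succ n ih =>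
    have hc : colF ci k (n+1) = colF ci k n ++ [(rowD ci n).get? k] := by
      simp [colF, List.range_succ]
    by_cases h : (rowD ci n).contains k
    · simp [colLen, h]
    · have hnone : (rowD ci n).get? k = none :=
        (PySem.Dict.get?_eq_none_iff_contains _ _).mpr (eq_false_of_ne_true h)
      have hle := colLen_le ci k n
      have hck : colLen ci k (n+1) = colLen ci k n := by simp [colLen, h]
      rw [hck, hc, ih, hnone, List.append_assoc,
        ← List.replicate_succ' (n := n - colLen ci k n)]
      congr 2
      omega

lemma mem_keyO (ci : List (List (String × String))) (k : String) (n : Nat) :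
    k ∈ keyO ci n ↔ colLen ci k n ≠ 0 := by
  induction n with
  | zero => simp [keyO, colLen]
  | succ n ih =>
    simp only [keyO, PySem.Set.mem_update, ih, colLen]
    by_cases h : (rowD ci n).contains k
    · simp [← PySem.Dict.contains_iff_mem_keys, h]
    · have hnm : k ∉ (rowD ci n).keys :=
        fun hm => h ((PySem.Dict.contains_iff_mem_keys _ _).mpr hm)
      simp [h, hnm]

lemma aStep_eq (i : Nat) (d : PySem.Dict String (List (Option String))) (p : String × String)
    (hle : (d.getD p.1 []).length ≤ i) :
    aStep (i : Int) d p
      = d.insert p.1 ((d.getD p.1 [] ++ List.replicate (i - (d.getD p.1 []).length) none)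
          ++ [some p.2]) := by
  unfold aStep
  have hrep : ((i : Int) - ((d.getD p.1 []).length : Int)).toNat
      = i - (d.getD p.1 []).length := by omega
  by_cases h : d.contains p.1
  · rw [PySem.Dict.setdefault_of_contains _ _ h]
    by_cases hlt : ((d.getD p.1 []).length : Int) < (i : Int)
    · simp only [hlt, if_true, PySem.Dict.getD_insert_self, PySem.Dict.insert_insert_self, hrep]
    · have : (d.getD p.1 []).length = i := by omega
      simp [this]
  · have hd0 : d.getD p.1 [] = [] :=
      PySem.Dict.getD_of_not_contains _ _ (eq_false_of_ne_true h)
    rw [PySem.Dict.setdefault_of_not_contains _ _ (eq_false_of_ne_true h)]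
    simp only [PySem.Dict.getD_insert_self, hd0] at hrep ⊢
    split_ifs with hlt
    · simp only [PySem.Dict.getD_insert_self, PySem.Dict.insert_insert_self]
      have : ((i:Int) - ((0:Nat):Int)).toNat = i := by omega
      simp_all
    · have hi : i = 0 := by
        simp only [List.length_nil, Nat.cast_zero] at hlt
        omega
      subst hi
      simp [PySem.Dict.insert_insert_self]

lemma find?_of_nodup_mem {α β : Type} [BEq α] [LawfulBEq α] (l : List (α × β)) (k : α) (v : β)
    (hnd : (l.map Prod.fst).Nodup) (hm : (k, v) ∈ l) :
    l.find? (fun p => p.1 == k) = some (k, v) := by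
  induction l with
  | nil => simp at hm
  | cons p l ih =>
    simp only [List.map_cons, List.nodup_cons] at hnd
    rcases List.mem_cons.mp hm with h | h
    · rw [← h]; simp
    · have hne : p.1 ≠ k := by
        intro he; exact hnd.1 (by simpa [he] using List.mem_map_of_mem (f := Prod.fst) h)
      simpa [List.find?_cons, hne] using ih hnd.2 h

lemma find?_of_not_mem {α β : Type} [BEq α] [LawfulBEq α] (l : List (α × β)) (k : α)
    (hm : ∀ v, (k, v) ∉ l) :
    l.find? (fun p => p.1 == k) = none := by
  rw [List.find?_eq_none]
  intro p hp
  simp only [beq_iff_eq]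
  intro he
  exact hm p.2 (by simpa [← he, Prod.mk.eta] using hp)

lemma innerA (n : Nat) (l : List (String × String)) :
    ∀ d : PySem.Dict String (List (Option String)),
    (l.map Prod.fst).Nodup →
    (∀ p ∈ l, (d.getD p.1 []).length ≤ n) →
    ((l.foldl (aStep (n : Int)) d).keys = PySem.Set.update d.keys (l.map Prod.fst)
      ∧ ∀ k, (l.foldl (aStep (n : Int)) d).getD k []
          = match l.find? (fun p => p.1 == k) with
            | some p => (d.getD k [] ++ List.replicate (n - (d.getD k []).length) none)
                ++ [some p.2]
            | none => d.getD k []) := by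
  induction l with
  | nil => intro d _ _; simp [PySem.Set.update_nil]
  | cons p rest ih =>
    intro d hnd hlen
    simp only [List.map_cons, List.nodup_cons] at hnd
    have hne_tail : ∀ q ∈ rest, q.1 ≠ p.1 := by
      intro q hq he
      exact hnd.1 (he ▸ List.mem_map_of_mem (f := Prod.fst) hq)
    simp only [List.foldl_cons, aStep_eq n d p (hlen p List.mem_cons_self)]
    have hlen1 : ∀ q ∈ rest,
        (((d.insert p.1 ((d.getD p.1 [] ++ List.replicate (n - (d.getD p.1 []).length) none)
          ++ [some p.2]))).getD q.1 []).length ≤ n := by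
      intro q hq
      rw [PySem.Dict.getD_insert_of_ne _ _ _ (hne_tail q hq)]
      exact hlen q (List.mem_cons_of_mem _ hq)
    obtain ⟨ihk, ihg⟩ := ih _ hnd.2 hlen1
    refine ⟨?_, ?_⟩
    · rw [ihk, List.map_cons, PySem.Set.update_cons]
      congr 1
      by_cases h : d.contains p.1
      · rw [PySem.Dict.keys_insert_of_contains _ _ h,
          PySem.Set.add_of_mem ((PySem.Dict.contains_iff_mem_keys _ _).mp h)]
      · rw [PySem.Dict.keys_insert_of_not_contains _ _ (eq_false_of_ne_true h),
          PySem.Set.add_of_not_mem (fun hm => h ((PySem.Dict.contains_iff_mem_keys _ _).mpr hm))]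
    · intro k
      rw [ihg k]
      by_cases he : k = p.1
      · have hrest : rest.find? (fun q => q.1 == k) = none :=
          find?_of_not_mem _ _ (fun v hv => hne_tail _ hv he)
        have hf : (p :: rest).find? (fun q => q.1 == k) = some p := by
          simp [he]
        rw [hrest, hf, he, PySem.Dict.getD_insert_self]
      · have hcons : (p :: rest).find? (fun q => q.1 == k) = rest.find? (fun q => q.1 == k) := by
          have : (p.1 == k) = false := beq_false_of_ne (fun h => he h.symm)
          simp [this]
        rw [hcons, PySem.Dict.getD_insert_of_ne _ _ _ he]

lemma outerA (ci : List (List (String × String))) (n : Nat) (hn : n ≤ ci.length) :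
    (processA ci n).keys = keyO ci n ∧ (keyO ci n).Nodup
      ∧ ∀ k, (processA ci n).getD k [] = colF ci k (colLen ci k n) := by
  induction n with
  | zero =>
    refine ⟨?_, ?_, ?_⟩ <;> simp [processA, keyO, colLen, colF, PySem.Dict.keys_empty,
      PySem.Dict.getD_empty]
  | succ n ih =>
    obtain ⟨hk, hnd, hg⟩ := ih (le_of_lt (Nat.lt_of_succ_le hn))
    have hlt : n < ci.length := Nat.lt_of_succ_le hn
    rw [processA_succ ci n hlt]
    have hndk : ((rowD ci n).items.map Prod.fst).Nodup := PySem.Dict.nodup_keys_ofList _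
    have hlen : ∀ p ∈ (rowD ci n).items, ((processA ci n).getD p.1 []).length ≤ n := by
      intro p _
      rw [hg p.1, length_colF]
      exact colLen_le ci p.1 n
    obtain ⟨hik, hig⟩ := innerA n (rowD ci n).items (processA ci n) hndk hlen
    refine ⟨?_, ?_, ?_⟩
    · rw [hik, hk]; rfl
    · exact PySem.Set.nodup_update _ _ hnd
    · intro k
      rw [hig k]
      by_cases h : (rowD ci n).get? k = none
      · have hcf : (rowD ci n).contains k = false :=
          (PySem.Dict.get?_eq_none_iff_contains _ _).mp h
        have hfind : (rowD ci n).items.find? (fun p => p.1 == k) = none := by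
          apply find?_of_not_mem
          intro v hv
          have := PySem.Dict.mem_keys_of_mem_items _ hv
          rw [← PySem.Dict.contains_iff_mem_keys] at this
          simp [hcf] at this
        rw [hfind, hg k]
        have : colLen ci k (n+1) = colLen ci k n := by simp [colLen, hcf]
        rw [this]
      · obtain ⟨v, hv⟩ := Option.ne_none_iff_exists'.mp h
        have hct : (rowD ci n).contains k = true := by
          rw [PySem.Dict.contains_eq_isSome_get?, hv]; rfl
        have hmem : (k, v) ∈ (rowD ci n).items :=
          (PySem.Dict.get?_eq_some_iff_mem_items _ _ _ (PySem.Dict.nodup_keys_ofList _)).mp hv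
        rw [find?_of_nodup_mem _ _ _ hndk hmem]
        simp only [hg k, length_colF]
        have hcl : colLen ci k (n+1) = n + 1 := by simp [colLen, hct]
        rw [hcl, ← colF_pad]
        show colF ci k n ++ [some v] = colF ci k (n+1)
        simp [colF, List.range_succ, hv]

def occL (ci : List (List (String × String))) (k : String) : Nat → List (Int × String)
  | 0 => []
  | n + 1 => occL ci k n ++ (match (rowD ci n).get? k with
      | some v => [((n : Int), v)]
      | none => [])

def processO (ci : List (List (String × String))) (n : Nat) :
    PySem.Dict String (List (Int × String)) :=
  (PySem.List.enumerate (ci.take n) 0).foldl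
    (fun d p => (PySem.Dict.ofList p.2).items.foldl (bStep p.1) d)
    PySem.Dict.empty

lemma processO_succ (ci : List (List (String × String))) (n : Nat) (hn : n < ci.length) :
    processO ci (n+1) = (rowD ci n).items.foldl (bStep (n : Int)) (processO ci n) := by
  unfold processO
  rw [List.take_add_one, List.getElem?_eq_getElem hn, Option.toList_some,
    PySem.List.enumerate_append, List.foldl_append,
    List.length_take_of_le (le_of_lt hn)]
  simp only [PySem.List.enumerate_cons, PySem.List.enumerate_nil, List.foldl_cons,
    List.foldl_nil, zero_add]
  congr 1
  simp [rowD, List.getD_eq_getElem?_getD, List.getElem?_eq_getElem hn]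

lemma filter_of_nodup_mem {α β : Type} [BEq α] [LawfulBEq α] (l : List (α × β)) (k : α) (v : β)
    (hnd : (l.map Prod.fst).Nodup) (hm : (k, v) ∈ l) :
    l.filter (fun p => p.1 == k) = [(k, v)] := by
  induction l with
  | nil => simp at hm
  | cons p l ih =>
    simp only [List.map_cons, List.nodup_cons] at hnd
    rcases List.mem_cons.mp hm with h | h
    · rw [← h]
      have hrest : l.filter (fun p => p.1 == k) = [] := by
        rw [List.filter_eq_nil_iff]
        intro q hq
        simp only [beq_iff_eq]
        intro he
        exact hnd.1 (by simpa [← h, he] using List.mem_map_of_mem (f := Prod.fst) hq)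
      simp [hrest]
    · have hne : p.1 ≠ k := by
        intro he; exact hnd.1 (he ▸ List.mem_map_of_mem (f := Prod.fst) h)
      simp [hne, ih hnd.2 h]

lemma filter_of_not_mem {α β : Type} [BEq α] [LawfulBEq α] (l : List (α × β)) (k : α)
    (hm : ∀ v, (k, v) ∉ l) :
    l.filter (fun p => p.1 == k) = [] := by
  rw [List.filter_eq_nil_iff]
  intro p hp
  simp only [beq_iff_eq]
  intro he
  exact hm p.2 (by simpa [← he, Prod.mk.eta] using hp)

lemma innerO (i : Int) (l : List (String × String)) (d : PySem.Dict String (List (Int × String))) :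
    ((l.foldl (bStep i) d).keys = PySem.Set.update d.keys (l.map Prod.fst))
      ∧ ∀ k, (l.foldl (bStep i) d).getD k []
          = d.getD k [] ++ (l.filter (fun p => p.1 == k)).map (fun q => (i, q.2)) := by
  have hmap : l.foldl (bStep i) d
      = (l.map (fun q => (q.1, ((i, q.2) : Int × String)))).foldl
          (fun d p => d.modify p.1 [] (· ++ [p.2])) d := by
    rw [List.foldl_map]
    rfl
  constructor
  · rw [hmap, PySem.Dict.keys_foldl_modify_key]
    congr 1
    simp
  · intro k
    rw [hmap, PySem.Dict.getD_foldl_modify_append]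
    congr 1
    rw [List.filter_map, List.map_map]
    rfl

lemma outerO (ci : List (List (String × String))) (n : Nat) (hn : n ≤ ci.length) :
    (processO ci n).keys = keyO ci n
      ∧ ∀ k, (processO ci n).getD k [] = occL ci k n := by
  induction n with
  | zero =>
    refine ⟨?_, ?_⟩ <;> simp [processO, keyO, occL, PySem.Dict.keys_empty, PySem.Dict.getD_empty]
  | succ n ih =>
    obtain ⟨hk, hg⟩ := ih (le_of_lt (Nat.lt_of_succ_le hn))
    rw [processO_succ ci n (Nat.lt_of_succ_le hn)]
    obtain ⟨hik, hig⟩ := innerO (n : Int) (rowD ci n).items (processO ci n)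
    have hndk : ((rowD ci n).items.map Prod.fst).Nodup := PySem.Dict.nodup_keys_ofList _
    refine ⟨?_, ?_⟩
    · rw [hik, hk]; rfl
    · intro k
      rw [hig k, hg k]
      by_cases h : (rowD ci n).get? k = none
      · have hfil : (rowD ci n).items.filter (fun p => p.1 == k) = [] := by
          apply filter_of_not_mem
          intro v hv
          have hmk := PySem.Dict.mem_keys_of_mem_items _ hv
          rw [← PySem.Dict.contains_iff_mem_keys] at hmk
          rw [(PySem.Dict.get?_eq_none_iff_contains _ _).mp h] at hmk
          exact Bool.false_ne_true hmk
        simp [occL, h, hfil]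
      · obtain ⟨v, hv⟩ := Option.ne_none_iff_exists'.mp h
        have hmem : (k, v) ∈ (rowD ci n).items :=
          (PySem.Dict.get?_eq_some_iff_mem_items _ _ _ (PySem.Dict.nodup_keys_ofList _)).mp hv
        rw [filter_of_nodup_mem _ _ _ hndk hmem]
        simp [occL, hv]

lemma colLen_pos_get? (ci : List (List (String × String))) (k : String) (n : Nat)
    (h : colLen ci k n ≠ 0) :
    ∃ v, (rowD ci (colLen ci k n - 1)).get? k = some v := by
  induction n with
  | zero => simp [colLen] at h
  | succ n ih =>
    by_cases hc : (rowD ci n).contains k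
    · have : colLen ci k (n+1) = n + 1 := by simp [colLen, hc]
      rw [this]
      simp only [Nat.add_sub_cancel]
      have := PySem.Dict.contains_eq_isSome_get? (d := rowD ci n) (k := k)
      rw [hc] at this
      obtain ⟨v, hv⟩ := Option.isSome_iff_exists.mp this.symm
      exact ⟨v, hv⟩
    · have he : colLen ci k (n+1) = colLen ci k n := by
        simp [colLen, eq_false_of_ne_true hc]
      rw [he] at h ⊢
      exact ih h

lemma occL_eq (ci : List (List (String × String))) (k : String) (n : Nat) :
    occL ci k n = occL ci k (colLen ci k n) := by
  induction n with
  | zero => simp [colLen]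
  | succ n ih =>
    by_cases hc : (rowD ci n).contains k
    · simp [colLen, hc]
    · have hnone : (rowD ci n).get? k = none :=
        (PySem.Dict.get?_eq_none_iff_contains _ _).mpr (eq_false_of_ne_true hc)
      have he : colLen ci k (n+1) = colLen ci k n := by simp [colLen, hc]
      rw [he, ← ih]
      simp [occL, hnone]

lemma foldSet (ci : List (List (String × String))) (k : String) (c : Nat) :
    ∀ n ≤ c, (occL ci k n).foldl (fun col q => col.set q.1.toNat (some q.2))
        (List.replicate c none)
      = (List.range c).map (fun i => if i < n then (rowD ci i).get? k else none) := by
  intro n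
  induction n with
  | zero =>
    intro _
    simp only [occL, List.foldl_nil, Nat.not_lt_zero, if_false]
    rw [List.map_const']
    simp
  | succ n ih =>
    intro hc
    have hn := ih (le_of_lt (Nat.lt_of_succ_le hc))
    by_cases h : (rowD ci n).get? k = none
    · simp only [occL, h, List.append_nil]
      rw [hn]
      apply List.map_congr_left
      intro i hi
      by_cases hin : i < n
      · simp [hin, Nat.lt_succ_of_lt hin]
      · by_cases hieq : i = n
        · simp [hieq, h]
        · have : ¬ i < n + 1 := by omega
          simp [hin, this]
    · obtain ⟨v, hv⟩ := Option.ne_none_iff_exists'.mp h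
      simp only [occL, hv, List.foldl_append, List.foldl_cons, List.foldl_nil, hn]
      apply List.ext_getElem
      · simp
      · intro i h1 h2
        simp only [List.length_set, List.length_map, List.length_range] at h1
        rw [List.getElem_set]
        by_cases hieq : ((n : Int).toNat) = i
        · have hni : i = n := by omega
          simp [hieq, hni, List.getElem_map, List.getElem_range, hv]
        · have hni : i ≠ n := by omega
          simp only [hieq, if_false, List.getElem_map, List.getElem_range]
          by_cases hin : i < n
          · simp [hin, Nat.lt_succ_of_lt hin]
          · have : ¬ i < n + 1 := by omega
            simp [hin, this]

lemma bCol_eq (ci : List (List (String × String))) (k : String)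
    (h : colLen ci k ci.length ≠ 0) :
    bCol (occL ci k ci.length) = colF ci k (colLen ci k ci.length) := by
  obtain ⟨m, hm⟩ : ∃ m, colLen ci k ci.length = m + 1 :=
    ⟨colLen ci k ci.length - 1, by omega⟩
  obtain ⟨v, hv⟩ := colLen_pos_get? ci k ci.length h
  rw [hm] at hv
  simp only [Nat.add_sub_cancel] at hv
  have hsplit : occL ci k ci.length = occL ci k m ++ [((m : Int), v)] := by
    rw [occL_eq, hm]
    simp [occL, hv]
  unfold bCol
  rw [hsplit, PySem.List.pyGet?_neg_one_append_singleton]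
  dsimp only
  have htn : ((m : Int)).toNat = m := Int.toNat_natCast m
  rw [htn, ← hsplit, occL_eq, hm]
  have hfs := foldSet ci k (m + 1) (m + 1) le_rfl
  rw [hfs]
  apply List.map_congr_left
  intro i hi
  simp [List.mem_range.mp hi]

-- ===== VERDICT (by name: the statement is the Claim_ definition above) =====
theorem container_info_table_spec : Claim_equal_container_info_table := by
  intro ci _
  unfold Spec_container_info_table
  have hA : container_info_table ci = (processA ci ci.length).items := by
    unfold container_info_table processA
    rw [List.take_length]
  have hB : container_info_table_alt ci
      = (processO ci ci.length).items.map (fun p => (p.1, bCol p.2)) := by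
    unfold container_info_table_alt processO
    rw [List.take_length]
  obtain ⟨hak, hand, hag⟩ := outerA ci ci.length le_rfl
  obtain ⟨hok, hog⟩ := outerO ci ci.length le_rfl
  rw [hA, hB,
    PySem.Dict.items_eq_map_keys _ (hak ▸ hand) ([] : List (Option String)),
    PySem.Dict.items_eq_map_keys _ (hok ▸ hand) ([] : List (Int × String)),
    hak, hok, List.map_map]
  apply List.map_congr_left
  intro k hkm
  have hm0 : colLen ci k ci.length ≠ 0 := (mem_keyO ci k ci.length).mp hkm
  simp only [Function.comp, hag k, hog k]
  rw [bCol_eq ci k hm0]
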